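-- pv_equiv track=rewrite | github.com/Kkwon-SB/Algorithm | Programmers-coding/Lv.0/120843.py | solution
-- ===== SOURCE A (Python) =====
-- def solution(numbers, k):
--     cnt = 1
--     idx = 0
--
--     while cnt <= k:
--         target = numbers[idx]
--         cnt += 1
--         idx += 2
--
--         if idx >= len(numbers):
--             idx = idx % len(numbers)
--
--     return target
-- ===== SOURCE B (Python) =====
-- def solution(numbers, k):
--     return numbers[(2 * (k - 1)) % len(numbers)]
-- ===== Notes on version B (the rewrite author's own statement) =====
-- stated objective: faster
-- what changed: Replaced the O(k) while-loop that steps an index by 2 with wraparound by the closed-form modular index numbers[(2*(k-1)) % len(numbers)].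
import Mathlib
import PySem

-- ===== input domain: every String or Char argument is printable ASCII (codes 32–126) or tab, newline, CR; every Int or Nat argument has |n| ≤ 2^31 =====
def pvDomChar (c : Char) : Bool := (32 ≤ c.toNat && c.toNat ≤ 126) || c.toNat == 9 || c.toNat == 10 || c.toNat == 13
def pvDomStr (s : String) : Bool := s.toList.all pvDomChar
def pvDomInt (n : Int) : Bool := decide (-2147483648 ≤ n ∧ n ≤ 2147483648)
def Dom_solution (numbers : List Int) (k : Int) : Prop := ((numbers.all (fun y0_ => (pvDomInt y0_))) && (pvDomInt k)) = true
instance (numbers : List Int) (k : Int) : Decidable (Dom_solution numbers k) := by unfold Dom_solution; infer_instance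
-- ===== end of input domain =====

-- B replaces A's O(k) stepping loop with the closed-form modular index (2*(k-1)) % len(numbers): asymptotically faster.

-- ===== PORT A =====
-- the while loop: state (cnt, idx, target); 'numbers[idx]' is pyGet? (in range whenever the loop
-- actually reads, under Pre_); .getD 0 only totalises the out-of-range case excluded by Pre_
def solutionGo (numbers : List Int) (k : Int) (cnt idx target : Int) : Int :=
  if _h : cnt ≤ k then
    let target := (PySem.List.pyGet? numbers idx).getD 0
    let cnt := cnt + 1
    let idx := idx + 2
    let idx := if idx ≥ (numbers.length : Int) then PySem.Int.mod idx (numbers.length : Int) else idx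
    solutionGo numbers k cnt idx target
  else target
termination_by (k + 1 - cnt).toNat
decreasing_by omega

def solution (numbers : List Int) (k : Int) : Int :=
  -- Python's 'target' is unassigned before the first iteration (k < 1 raises NameError: outside Pre_);
  -- 0 stands for that unassigned state
  solutionGo numbers k 1 0 0

-- ===== PORT B =====
def solution_alt (numbers : List Int) (k : Int) : Int :=
  (PySem.List.pyGet? numbers (PySem.Int.mod (2 * (k - 1)) (numbers.length : Int))).getD 0

-- ===== PRECONDITION & SPEC =====
-- Pre_ excludes exactly where A raises: empty numbers (IndexError, or ZeroDivisionError for k<1 in B),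
-- and k < 1 (A's 'target' is never assigned: NameError)
def Pre_solution (numbers : List Int) (k : Int) : Prop := numbers ≠ [] ∧ 1 ≤ k
instance (numbers : List Int) (k : Int) : Decidable (Pre_solution numbers k) := by unfold Pre_solution; infer_instance
def pvWitness_solution : List Int × Int := ([1, 2, 3, 4], 3)

def Spec_solution (numbers : List Int) (k : Int) (out : Int) : Prop := out = solution_alt numbers k
instance (numbers : List Int) (k : Int) (out : Int) : Decidable (Spec_solution numbers k out) := by unfold Spec_solution; infer_instance

-- ===== CLAIM (what is proved, stated in full; the proofs are below) =====
def Claim_equal_solution : Prop := ∀ (numbers : List Int) (k : Int), Dom_solution numbers k → Pre_solution numbers k → Spec_solution numbers k (solution numbers k)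

-- ===== LEMMAS AND PROOFS =====

-- loop invariant: with 0 ≤ idx < len and cnt ≤ k, the loop returns the element read in its last
-- iteration, i.e. the one at (idx + 2*(k - cnt)) mod len
theorem solutionGo_closed (numbers : List Int) (k cnt idx target : Int)
    (hne : numbers ≠ []) (h0 : 0 ≤ idx) (hlt : idx < (numbers.length : Int)) (hck : cnt ≤ k) :
    solutionGo numbers k cnt idx target
      = (PySem.List.pyGet? numbers ((idx + 2 * (k - cnt)) % (numbers.length : Int))).getD 0 := by
  have hlen : 0 < (numbers.length : Int) := by
    have : numbers.length ≠ 0 := by simpa using (List.length_pos_iff.mpr hne).ne'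
    omega
  by_cases hlast : k ≤ cnt
  · -- last iteration: cnt = k
    have hck' : cnt = k := le_antisymm hck hlast
    rw [solutionGo]
    simp only [hck, dif_pos]
    rw [solutionGo]
    have : ¬ (cnt + 1 ≤ k) := by omega
    simp only [this, dif_neg, not_false_iff]
    have : (idx + 2 * (k - cnt)) % (numbers.length : Int) = idx := by
      rw [hck']; simp [Int.emod_eq_of_lt h0 hlt]
    rw [this]
  · -- cnt < k: one step, then induction
    have hck2 : cnt + 1 ≤ k := by omega
    rw [solutionGo]
    simp only [hck, dif_pos]
    set idx' := if idx + 2 ≥ (numbers.length : Int) then PySem.Int.mod (idx + 2) (numbers.length : Int) else idx + 2 with hidx'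
    have hmod : PySem.Int.mod (idx + 2) (numbers.length : Int) = (idx + 2) % (numbers.length : Int) :=
      PySem.Int.mod_eq_emod_of_pos hlen
    have hrange : 0 ≤ idx' ∧ idx' < (numbers.length : Int) := by
      by_cases hge : idx + 2 ≥ (numbers.length : Int)
      · simp only [hidx', hge, if_pos, hmod]
        exact ⟨Int.emod_nonneg _ (by omega), Int.emod_lt_of_pos _ hlen⟩
      · simp only [hidx', hge, if_neg, not_false_iff]
        omega
    have hcong : idx' % (numbers.length : Int) = (idx + 2) % (numbers.length : Int) := by
      by_cases hge : idx + 2 ≥ (numbers.length : Int)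
      · simp [hidx', hge, hmod, Int.emod_emod_of_dvd]
      · simp [hidx', hge]
    have ih := solutionGo_closed numbers k (cnt + 1) idx' ((PySem.List.pyGet? numbers idx).getD 0)
      hne hrange.1 hrange.2 hck2
    rw [ih]
    have hfix : (idx' + 2 * (k - (cnt + 1))) % (numbers.length : Int)
        = (idx + 2 * (k - cnt)) % (numbers.length : Int) := by
      rw [← Int.emod_add_emod, hcong, Int.emod_add_emod]
      have harg : idx + 2 + 2 * (k - (cnt + 1)) = idx + 2 * (k - cnt) := by ring
      rw [harg]
    rw [hfix]
termination_by (k + 1 - cnt).toNat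
decreasing_by omega

-- ===== VERDICT (by name: the statement is the Claim_ definition above) =====
theorem solution_spec : Claim_equal_solution := by
  intro numbers k _hdom hpre
  obtain ⟨hne, hk⟩ := hpre
  have hlen : 0 < (numbers.length : Int) := by
    have : numbers.length ≠ 0 := by simpa using (List.length_pos_iff.mpr hne).ne'
    omega
  unfold Spec_solution solution solution_alt
  rw [solutionGo_closed numbers k 1 0 0 hne le_rfl hlen hk]
  rw [PySem.Int.mod_eq_emod_of_pos hlen]
  norm_num
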